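-- pv_equiv track=rewrite | github.com/Yuzumi/subnet | by_host.py | get_increment_value
-- ===== SOURCE A (Python) =====
-- def get_increment_value(mask) -> list:
--     mask = mask.split('.')
--
--     for i, _ in enumerate(mask):
--         if ('0' in _ and '1' in _) or mask[i+1] == "00000000":
--             octet = i
--             break
--
--     bits = list(mask[octet])
--     bits.reverse()
--     increment = []
--     for bit in bits:
--         increment.append(int(bit))
--
--         if bit == '1':
--             break
--
--     increment.reverse()
--
--     increment_value = [octet, int(''.join(map(str, increment)), 2)]
--
--     return increment_value
-- ===== SOURCE B (Python) =====
-- def get_increment_value(mask) -> list: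
--     parts = mask.split('.')
--     octet = next(i for i, p in enumerate(parts)
--                  if ('0' in p and '1' in p) or parts[i + 1] == "00000000")
--     s = parts[octet]
--     stripped = s.rstrip('0')
--     return [octet, 0 if not stripped else 1 << (len(s) - len(stripped))]
-- ===== Notes on version B (the rewrite author's own statement) =====
-- stated objective: simpler
-- what changed: B replaces A's reverse/collect-digits-until-'1'/reverse/join/int(...,2) bit-list loop by s.rstrip('0') plus the closed form 1 << (number of trailing zeros) (0 for an all-zero octet), and finds the octet with a generator expression instead of a for/break loop.
import Mathlib
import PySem

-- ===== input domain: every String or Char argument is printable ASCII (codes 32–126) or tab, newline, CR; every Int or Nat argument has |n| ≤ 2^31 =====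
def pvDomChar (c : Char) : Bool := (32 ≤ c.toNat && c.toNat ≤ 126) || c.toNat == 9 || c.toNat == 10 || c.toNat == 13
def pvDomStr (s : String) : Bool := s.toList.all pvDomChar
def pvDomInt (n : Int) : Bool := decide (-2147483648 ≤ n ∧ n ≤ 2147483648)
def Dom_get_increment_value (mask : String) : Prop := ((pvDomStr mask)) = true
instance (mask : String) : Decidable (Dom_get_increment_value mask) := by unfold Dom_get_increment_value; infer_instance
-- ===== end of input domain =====

-- B rewrites A's tail (reverse / collect digits until '1' / reverse / join / int(.,2))
-- as rstrip('0') plus a closed-form power of two; objective: simpler.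

-- ===== PORT A =====
-- int(bit) for a one-character string; exact on digit characters (Pre_ admits only '0'/'1' here)
def pvDigitA (c : Char) : Int := (c.toNat : Int) - 48

-- the 'for bit in bits: increment.append(int(bit)); if bit == '1': break' loop
def pvCollectA : List Char → List Int → List Int
  | [], acc => acc
  | c :: rest, acc =>
    let acc' := acc ++ [pvDigitA c]
    if c = '1' then acc' else pvCollectA rest acc'

-- int(''.join(map(str, increment)), 2); exact when every digit is 0 or 1 (guaranteed by Pre_)
def pvParse2A (ds : List Int) : Int := ds.foldl (fun v d => 2 * v + d) 0

-- the octet-finding for/break loop; none = the loop raises (IndexError) or ends with octet unbound (NameError)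
def pvFindA (parts : List (List Char)) (i : Nat) : Option Nat :=
  if h : i < parts.length then
    -- '0' in _ and '1' in _  (single-character needle: substring test = membership)
    if parts[i].contains '0' && parts[i].contains '1' then some i
    else
      match PySem.List.pyGet? parts ((i : Int) + 1) with
      | none => none                                   -- IndexError
      | some t => if t = "00000000".toList then some i else pvFindA parts (i + 1)
  else none                                            -- octet was never bound (NameError)
termination_by parts.length - i

def get_increment_value (mask : String) : List Int :=
  let parts := PySem.Chars.splitOn mask.toList ['.']
  match pvFindA parts 0 with
  | none => []                                         -- A raises here; excluded by Pre_
  | some octet =>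
    let bits := (parts.getD octet []).reverse
    let increment := (pvCollectA bits []).reverse
    [(octet : Int), pvParse2A increment]

-- ===== PORT B =====
-- the generator over enumerate(parts); none = the generator raises IndexError (or is exhausted)
def pvFindB (parts : List (List Char)) : List (Int × List Char) → Option Int
  | [] => none
  | (i, p) :: rest =>
    if p.contains '0' && p.contains '1' then some i
    else
      match PySem.List.pyGet? parts (i + 1) with
      | none => none
      | some t => if t = "00000000".toList then some i else pvFindB parts rest

def get_increment_value_alt (mask : String) : List Int :=
  let parts := PySem.Chars.splitOn mask.toList ['.']
  match pvFindB parts (PySem.List.enumerate parts) with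
  | none => []                                         -- B raises here; excluded by Pre_
  | some octet =>
    let s := parts.getD octet.toNat []
    let stripped := (s.reverse.dropWhile (· = '0')).reverse   -- s.rstrip('0')
    [octet, if stripped = [] then 0 else (2 : Int) ^ (s.length - stripped.length)]  -- 1 << tz

-- ===== PRECONDITION & SPEC =====
-- the loop condition of both programs, as a predicate on the input
abbrev pvCond (parts : List (List Char)) (i : Nat) : Prop :=
  ('0' ∈ parts.getD i [] ∧ '1' ∈ parts.getD i []) ∨
  (i + 1 < parts.length ∧ parts.getD (i + 1) [] = "00000000".toList)

-- the chosen octet parses: nonempty, and its first non-'0' character from the right (if any) is '1'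
abbrev pvGood (s : List Char) : Prop :=
  s ≠ [] ∧ (s.reverse.dropWhile (· = '0')).headD '1' = '1'

-- Pre_ holds exactly when the Python A returns: some octet is selected before the loop runs
-- off the end (no IndexError/NameError), and that octet's scanned suffix parses in base 2.
def Pre_get_increment_value (mask : String) : Prop :=
  let parts := PySem.Chars.splitOn mask.toList ['.']
  ∃ i < parts.length,
    pvCond parts i ∧ (∀ j < i, ¬ pvCond parts j) ∧ pvGood (parts.getD i [])

instance (mask : String) : Decidable (Pre_get_increment_value mask) := by
  unfold Pre_get_increment_value; infer_instance

def pvWitness_get_increment_value : String := "11111111.11110000.00000000.00000000"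

def Spec_get_increment_value (mask : String) (out : List Int) : Prop := out = get_increment_value_alt mask
instance (mask : String) (out : List Int) : Decidable (Spec_get_increment_value mask out) := by unfold Spec_get_increment_value; infer_instance

-- ===== CLAIM (what is proved, stated in full; the proofs are below) =====
def Claim_equal_get_increment_value : Prop := ∀ (mask : String), Dom_get_increment_value mask → Pre_get_increment_value mask → Spec_get_increment_value mask (get_increment_value mask)

-- ===== LEMMAS AND PROOFS =====

theorem pvCollectA_zeros (k : Nat) (acc : List Int) :
    pvCollectA (List.replicate k '0') acc = acc ++ List.replicate k 0 := by
  induction k generalizing acc with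
  | zero => simp [pvCollectA]
  | succ n ih => simp [List.replicate_succ, pvCollectA, pvDigitA, ih]

theorem pvCollectA_zeros_one (k : Nat) (rest : List Char) (acc : List Int) :
    pvCollectA (List.replicate k '0' ++ '1' :: rest) acc = acc ++ List.replicate k 0 ++ [1] := by
  induction k generalizing acc with
  | zero => simp [pvCollectA, pvDigitA]
  | succ n ih => simp [List.replicate_succ, pvCollectA, pvDigitA, ih]

theorem pvParse2A_zeros (k : Nat) (v : Int) :
    (List.replicate k (0 : Int)).foldl (fun v d => 2 * v + d) v = v * 2 ^ k := by
  induction k generalizing v with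
  | zero => simp
  | succ n ih => simp [List.replicate_succ, ih, pow_succ]; ring

theorem pvFindA_first (parts : List (List Char)) (o : Nat) (ho : o < parts.length)
    (hc : pvCond parts o) (i : Nat) (hio : i ≤ o)
    (hmin : ∀ j, i ≤ j → j < o → ¬ pvCond parts j) :
    pvFindA parts i = some o := by
  induction hk : o - i generalizing i with
  | zero =>
    have hie : i = o := by omega
    subst hie
    have hlen : i < parts.length := ho
    unfold pvFindA
    rw [dif_pos hlen]
    rcases hc with ⟨h0, h1⟩ | ⟨hr, he⟩
    · rw [List.getD_eq_getElem parts [] hlen] at h0 h1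
      simp [h0, h1]
    · have : PySem.List.pyGet? parts ((i : Int) + 1) = some parts[i+1] := by
        have : ((i : Int) + 1) = ((i + 1 : Nat) : Int) := by push_cast; ring
        rw [this, PySem.List.pyGet?_natCast, List.getElem?_eq_getElem hr]
      rw [List.getD_eq_getElem parts [] hr] at he
      by_cases hA : (parts[i].contains '0' && parts[i].contains '1') = true
      · rw [if_pos hA]
      · rw [if_neg hA, this]; dsimp only; rw [if_pos he]
  | succ n ih =>
    have hlt : i < o := by omega
    have hlen : i < parts.length := by omega
    have hni : ¬ pvCond parts i := hmin i le_rfl hlt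
    unfold pvFindA
    rw [dif_pos hlen]
    have hA : (parts[i].contains '0' && parts[i].contains '1') = false := by
      by_contra hb
      simp only [Bool.not_eq_false, Bool.and_eq_true, List.contains_iff_mem] at hb
      exact hni (Or.inl (by rw [List.getD_eq_getElem parts [] hlen]; exact hb))
    have hr : i + 1 < parts.length := by omega
    have hget : PySem.List.pyGet? parts ((i : Int) + 1) = some parts[i+1] := by
      have : ((i : Int) + 1) = ((i + 1 : Nat) : Int) := by push_cast; ring
      rw [this, PySem.List.pyGet?_natCast, List.getElem?_eq_getElem hr]
    have hne : parts[i+1] ≠ "00000000".toList := by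
      intro he
      apply hni
      right
      exact ⟨hr, by rw [List.getD_eq_getElem parts [] hr]; exact he⟩
    simp only [hA, Bool.false_eq_true, if_false, hget]
    rw [if_neg hne]
    exact ih (i + 1) (by omega) (fun j hj1 hj2 => hmin j (by omega) hj2) (by omega)

theorem pvFindB_first (parts : List (List Char)) (o : Nat) (ho : o < parts.length)
    (hc : pvCond parts o) (i : Nat) (hio : i ≤ o)
    (hmin : ∀ j, i ≤ j → j < o → ¬ pvCond parts j) :
    pvFindB parts (PySem.List.enumerate (parts.drop i) (i : Int)) = some (o : Int) := by
  induction hk : o - i generalizing i with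
  | zero =>
    have hie : i = o := by omega
    subst hie
    rw [List.drop_eq_getElem_cons ho, PySem.List.enumerate_cons]
    show pvFindB parts ((↑i, parts[i]) :: _) = some (↑i)
    unfold pvFindB
    rcases hc with ⟨h0, h1⟩ | ⟨hr, he⟩
    · rw [List.getD_eq_getElem parts [] ho] at h0 h1
      have hA : (parts[i].contains '0' && parts[i].contains '1') = true := by
        simp [h0, h1]
      rw [if_pos hA]
    · have hget : PySem.List.pyGet? parts ((i : Int) + 1) = some parts[i+1] := by
        have : ((i : Int) + 1) = ((i + 1 : Nat) : Int) := by push_cast; ring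
        rw [this, PySem.List.pyGet?_natCast, List.getElem?_eq_getElem hr]
      rw [List.getD_eq_getElem parts [] hr] at he
      by_cases hA : (parts[i].contains '0' && parts[i].contains '1') = true
      · rw [if_pos hA]
      · rw [if_neg hA, hget]; dsimp only; rw [if_pos he]
  | succ n ih =>
    have hlt : i < o := by omega
    have hlen : i < parts.length := by omega
    have hni : ¬ pvCond parts i := hmin i le_rfl hlt
    rw [List.drop_eq_getElem_cons hlen, PySem.List.enumerate_cons]
    unfold pvFindB
    have hA : (parts[i].contains '0' && parts[i].contains '1') = false := by
      by_contra hb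
      simp only [Bool.not_eq_false, Bool.and_eq_true, List.contains_iff_mem] at hb
      exact hni (Or.inl (by rw [List.getD_eq_getElem parts [] hlen]; exact hb))
    have hr : i + 1 < parts.length := by omega
    have hget : PySem.List.pyGet? parts ((i : Int) + 1) = some parts[i+1] := by
      have : ((i : Int) + 1) = ((i + 1 : Nat) : Int) := by push_cast; ring
      rw [this, PySem.List.pyGet?_natCast, List.getElem?_eq_getElem hr]
    have hne : parts[i+1] ≠ "00000000".toList := by
      intro he
      exact hni (Or.inr ⟨hr, by rw [List.getD_eq_getElem parts [] hr]; exact he⟩)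
    simp only [hA, Bool.false_eq_true, if_false, hget]
    rw [if_neg hne]
    have hcast : (i : Int) + 1 = ((i + 1 : Nat) : Int) := by push_cast; ring
    rw [hcast]
    exact ih (i + 1) (by omega) (fun j hj1 hj2 => hmin j (by omega) hj2) (by omega)


-- value lemma: under pvGood, A's tail computation equals B's closed form
theorem pv_decomp (s : List Char) (_hne : s ≠ [])
    (hhd : ((s.reverse.dropWhile (· = '0')).headD '1') = '1') :
    (s.reverse.dropWhile (· = '0') = [] ∧
      s.reverse = List.replicate s.length '0') ∨
    (∃ k t, s.reverse = List.replicate k '0' ++ '1' :: t ∧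
      s.reverse.dropWhile (· = '0') = '1' :: t ∧ s.length = k + (t.length + 1)) := by
  set r := s.reverse with hr
  have hsplit := List.takeWhile_append_dropWhile (p := fun c => decide (c = '0')) (l := r)
  have htw : r.takeWhile (fun c => decide (c = '0')) = List.replicate (r.takeWhile (fun c => decide (c = '0'))).length '0' := by
    rw [List.eq_replicate_iff]
    refine ⟨rfl, fun b hb => ?_⟩
    have := List.mem_takeWhile_imp hb
    simpa using this
  cases hd : r.dropWhile (fun c => decide (c = '0')) with
  | nil =>
    left
    constructor
    · rfl
    · have : r = r.takeWhile (fun c => decide (c = '0')) := by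
        conv_lhs => rw [← hsplit]
        rw [hd, List.append_nil]
      have hlen : s.length = (r.takeWhile (fun c => decide (c = '0'))).length := by
        rw [← List.length_reverse (as := s), ← hr]; conv_lhs => rw [this]
      rw [hlen]
      conv_lhs => rw [this, htw]
  | cons c t =>
    right
    have hc : c = '1' := by
      have : (r.dropWhile (· = '0')).headD '1' = '1' := hhd
      rw [show (r.dropWhile (· = '0')) = r.dropWhile (fun c => decide (c = '0')) from rfl, hd] at this
      simpa using this
    subst hc
    refine ⟨(r.takeWhile (fun c => decide (c = '0'))).length, t, ?_, ?_, ?_⟩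
    · conv_lhs => rw [← hsplit, htw, hd]
    · rfl
    · have : s.length = r.length := by rw [hr, List.length_reverse]
      rw [this]
      conv_lhs => rw [← hsplit]
      simp [hd]

-- ===== VERDICT (by name: the statement is the Claim_ definition above) =====
theorem get_increment_value_spec : Claim_equal_get_increment_value := by
  intro mask _ hpre
  unfold Spec_get_increment_value
  unfold Pre_get_increment_value at hpre
  obtain ⟨o, ho, hc, hmin, hgood⟩ := hpre
  set parts := PySem.Chars.splitOn mask.toList ['.'] with hparts
  have hA := pvFindA_first parts o ho hc 0 (Nat.zero_le o) (fun j _ hj2 => hmin j hj2)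
  have hB := pvFindB_first parts o ho hc 0 (Nat.zero_le o) (fun j _ hj2 => hmin j hj2)
  rw [List.drop_zero, Nat.cast_zero] at hB
  simp only [get_increment_value, get_increment_value_alt, ← hparts, hA, hB, Int.toNat_natCast]
  obtain ⟨hne, hhd⟩ := hgood
  set s := parts.getD o [] with hs
  rcases pv_decomp s hne hhd with ⟨hdnil, hrep⟩ | ⟨k, t, hrev, hdrop, hlen⟩
  · rw [hdnil, hrep]
    simp only [List.reverse_nil, ↓reduceIte]
    rw [show pvCollectA (List.replicate s.length '0') [] = [] ++ List.replicate s.length 0 from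
      pvCollectA_zeros s.length [], List.nil_append, List.reverse_replicate]
    unfold pvParse2A
    rw [pvParse2A_zeros s.length 0]
    norm_num
  · rw [hdrop, hrev]
    rw [show pvCollectA (List.replicate k '0' ++ '1' :: t) [] =
      [] ++ List.replicate k 0 ++ [1] from pvCollectA_zeros_one k t [], List.nil_append]
    have hstr : ('1' :: t).reverse ≠ [] := by simp
    rw [if_neg hstr]
    unfold pvParse2A
    rw [List.reverse_append, List.reverse_replicate]
    simp only [List.reverse_cons, List.reverse_nil, List.nil_append, List.singleton_append,
      List.foldl_cons]
    rw [pvParse2A_zeros k (2 * 0 + 1)]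
    have hl : s.length - (t.reverse ++ ['1']).length = k := by
      simp [hlen]
    rw [hl]
    norm_num
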